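-- pv_equiv track=rewrite | github.com/seba3c/python-coding-challenges | src/anagrams/anagram.py | has_same_elements
-- ===== SOURCE A (Python) =====
-- def has_same_elements(s1, s2):
--     s1_dict = {}
--     s2_dict = {}
--     for s in s1:
--         s1_dict[s] = s1_dict.get(s, 0) + 1
--     for s in s2:
--         s2_dict[s] = s2_dict.get(s, 0) + 1
--     return s1_dict == s2_dict
-- ===== SOURCE B (Python) =====
-- def has_same_elements(s1, s2):
--     # sort both sequences and compare: equal sorted orders <=> equal multisets
--     return sorted(s1) == sorted(s2)
-- ===== Notes on version B (the rewrite author's own statement) =====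
-- stated objective: idiomatic
-- what changed: B sorts both sequences and compares the sorted lists (comparison sorting, O(n log n)) instead of building two hash-based frequency dicts and comparing them.
import Mathlib
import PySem

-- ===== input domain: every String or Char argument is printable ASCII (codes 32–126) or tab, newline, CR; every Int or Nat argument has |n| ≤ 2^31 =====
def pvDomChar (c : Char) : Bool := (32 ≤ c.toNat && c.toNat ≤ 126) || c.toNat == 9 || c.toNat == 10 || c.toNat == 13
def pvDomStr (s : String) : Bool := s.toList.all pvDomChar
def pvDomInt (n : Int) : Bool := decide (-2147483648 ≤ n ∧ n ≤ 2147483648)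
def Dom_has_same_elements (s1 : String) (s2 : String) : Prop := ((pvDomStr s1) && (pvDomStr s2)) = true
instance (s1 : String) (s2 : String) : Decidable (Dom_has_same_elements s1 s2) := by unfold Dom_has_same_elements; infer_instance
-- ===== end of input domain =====

-- B sorts both sequences and compares the sorted lists instead of building two frequency dicts and comparing them; different algorithm, same result.

-- ===== PORT A =====
-- Python's 'd1 == d2' on dicts ignores insertion order: ported as mutual agreement of get? on both key sets.
def pyDictEq (d1 d2 : PySem.Dict Char Int) : Bool :=
  d1.keys.all (fun k => d1.get? k == d2.get? k) && d2.keys.all (fun k => d1.get? k == d2.get? k)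

def has_same_elements (s1 : String) (s2 : String) : Bool :=
  let s1_dict := s1.toList.foldl (fun d s => d.insert s (d.getD s 0 + 1)) (PySem.Dict.empty : PySem.Dict Char Int)
  let s2_dict := s2.toList.foldl (fun d s => d.insert s (d.getD s 0 + 1)) (PySem.Dict.empty : PySem.Dict Char Int)
  pyDictEq s1_dict s2_dict

-- ===== PORT B =====
def has_same_elements_alt (s1 : String) (s2 : String) : Bool :=
  PySem.List.sorted s1.toList (fun x => x) false == PySem.List.sorted s2.toList (fun x => x) false

-- ===== PRECONDITION & SPEC =====
def Spec_has_same_elements (s1 : String) (s2 : String) (out : Bool) : Prop := out = has_same_elements_alt s1 s2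
instance (s1 : String) (s2 : String) (out : Bool) : Decidable (Spec_has_same_elements s1 s2 out) := by unfold Spec_has_same_elements; infer_instance

-- ===== CLAIM (what is proved, stated in full; the proofs are below) =====
def Claim_equal_has_same_elements : Prop := ∀ (s1 : String) (s2 : String), Dom_has_same_elements s1 s2 → Spec_has_same_elements s1 s2 (has_same_elements s1 s2)

-- ===== LEMMAS AND PROOFS =====

-- get? on a counter dict: some count on members, none off them
lemma get?_counter (l : List Char) (v : Char) :
    (PySem.Dict.counter l).get? v = if v ∈ l then some ((l.count v : Int)) else none := by
  by_cases h : v ∈ l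
  · simp only [h, if_true]
    have hc : (PySem.Dict.counter l).contains v = true := by
      rw [PySem.Dict.contains_counter]; simpa using h
    have hs : ((PySem.Dict.counter l).get? v).isSome := by
      rw [← PySem.Dict.contains_eq_isSome_get?]; exact hc
    obtain ⟨w, hw⟩ := Option.isSome_iff_exists.mp hs
    have hgd := PySem.Dict.getD_of_get?_eq_some (PySem.Dict.counter l) 0 hw
    rw [PySem.Dict.getD_counter] at hgd
    rw [hw, hgd]
  · simp only [h, if_false]
    rw [PySem.Dict.get?_eq_none_iff_contains, PySem.Dict.contains_counter]
    simpa using h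

-- A's dict comparison succeeds exactly when every character count agrees
lemma aP (l1 l2 : List Char) :
    (pyDictEq (l1.foldl (fun d s => d.insert s (d.getD s 0 + 1)) (PySem.Dict.empty : PySem.Dict Char Int))
              (l2.foldl (fun d s => d.insert s (d.getD s 0 + 1)) (PySem.Dict.empty : PySem.Dict Char Int)) = true)
      ↔ ∀ c : Char, l1.count c = l2.count c := by
  unfold pyDictEq
  rw [PySem.Dict.foldl_insert_getD_add_one_eq_counter, PySem.Dict.foldl_insert_getD_add_one_eq_counter]
  rw [Bool.and_eq_true, List.all_eq_true, List.all_eq_true]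
  simp only [PySem.Dict.keys_counter, PySem.Set.mem_ofList, get?_counter, beq_iff_eq]
  constructor
  · rintro ⟨h1, h2⟩ c
    by_cases hm1 : c ∈ l1
    · have hh := h1 c hm1
      rw [if_pos hm1] at hh
      by_cases hm2 : c ∈ l2
      · rw [if_pos hm2] at hh
        exact_mod_cast Option.some.inj hh
      · rw [if_neg hm2] at hh
        exact absurd hh (by simp)
    · by_cases hm2 : c ∈ l2
      · have hh := h2 c hm2
        rw [if_neg hm1, if_pos hm2] at hh
        exact absurd hh.symm (by simp)
      · rw [List.count_eq_zero_of_not_mem hm1, List.count_eq_zero_of_not_mem hm2]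
  · intro hc
    have hmem : ∀ c : Char, c ∈ l1 ↔ c ∈ l2 := by
      intro c
      rw [← List.count_pos_iff, ← List.count_pos_iff, hc c]
    have hone : ∀ c ∈ l1, (if c ∈ l1 then some ((l1.count c : Int)) else none)
        = (if c ∈ l2 then some ((l2.count c : Int)) else none) := by
      intro c hm1
      rw [if_pos hm1, if_pos ((hmem c).mp hm1), hc c]
    refine ⟨hone, ?_⟩
    intro c hm2
    have hm1 : c ∈ l1 := (hmem c).mpr hm2
    exact hone c hm1

-- ===== VERDICT (by name: the statement is the Claim_ definition above) =====
theorem has_same_elements_spec : Claim_equal_has_same_elements := by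
  intro s1 s2 _
  unfold Spec_has_same_elements has_same_elements has_same_elements_alt
  rw [Bool.eq_iff_iff, aP s1.toList s2.toList, beq_iff_eq,
    PySem.List.sorted_id_eq_sorted_id_iff_perm, List.perm_iff_count]
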